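-- pv_equiv track=rewrite | github.com/movekj/opsplatform | backend/stree/views.py | parent_tree_node_path__gt__has_perm_tree_node_paths
-- ===== SOURCE A (Python) =====
-- def parent_tree_node_path__gt__has_perm_tree_node_paths(
--     has_perm_tree_node_paths, parent_tree_node_path
-- ):
--     for has_perm_tree_node_path in has_perm_tree_node_paths:
--         if (
--             parent_tree_node_path.startswith(has_perm_tree_node_path)
--             and parent_tree_node_path > has_perm_tree_node_path
--         ):
--             return True
--     return False
-- ===== SOURCE B (Python) =====
-- def parent_tree_node_path__gt__has_perm_tree_node_paths(
--     has_perm_tree_node_paths, parent_tree_node_path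
-- ):
--     granted = set(has_perm_tree_node_paths)
--     lengths = {len(q) for q in granted}
--     for n in lengths:
--         if n < len(parent_tree_node_path) and parent_tree_node_path[:n] in granted:
--             return True
--     return False
-- ===== Notes on version B (the rewrite author's own statement) =====
-- stated objective: alternative
-- what changed: Instead of scanning every stored path and testing startswith plus a string comparison, B builds a set of the stored paths and a set of their lengths once, and probes the set with the parent path truncated to each stored length shorter than the parent.
import Mathlib
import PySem

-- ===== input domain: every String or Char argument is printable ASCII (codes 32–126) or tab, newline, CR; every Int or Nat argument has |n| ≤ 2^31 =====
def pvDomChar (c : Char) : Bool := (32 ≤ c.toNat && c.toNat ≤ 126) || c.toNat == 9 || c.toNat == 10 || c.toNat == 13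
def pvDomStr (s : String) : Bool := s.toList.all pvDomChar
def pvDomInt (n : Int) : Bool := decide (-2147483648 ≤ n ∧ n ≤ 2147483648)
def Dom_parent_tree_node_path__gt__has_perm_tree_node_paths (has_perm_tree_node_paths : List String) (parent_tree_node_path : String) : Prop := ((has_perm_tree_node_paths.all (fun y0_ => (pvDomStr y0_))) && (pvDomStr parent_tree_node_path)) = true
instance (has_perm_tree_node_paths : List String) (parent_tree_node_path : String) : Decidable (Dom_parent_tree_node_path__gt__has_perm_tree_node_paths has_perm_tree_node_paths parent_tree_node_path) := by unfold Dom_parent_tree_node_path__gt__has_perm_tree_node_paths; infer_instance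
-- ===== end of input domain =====

-- ===== PORT A =====
-- B replaces A's per-stored-path startswith scan by a set of the stored paths, probed
-- with the parent path truncated to each stored length (objective: alternative).
-- A-side helper: the for-loop over has_perm_tree_node_paths with early return
def pvLoopA (parent : String) : List String → Bool
  | [] => false
  | h :: t =>
    if PySem.Str.startswith parent h && decide (h < parent) then true
    else pvLoopA parent t

def parent_tree_node_path__gt__has_perm_tree_node_paths (has_perm_tree_node_paths : List String) (parent_tree_node_path : String) : Bool :=
  pvLoopA parent_tree_node_path has_perm_tree_node_paths

-- ===== PORT B =====
def parent_tree_node_path__gt__has_perm_tree_node_paths_alt (has_perm_tree_node_paths : List String) (parent_tree_node_path : String) : Bool :=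
  let granted : PySem.Set String := PySem.Set.ofList has_perm_tree_node_paths
  let lengths : PySem.Set Int := PySem.Set.ofList (granted.map (fun q => PySem.Str.len q))
  lengths.any (fun n =>
    decide (n < PySem.Str.len parent_tree_node_path) &&
    decide (PySem.Str.slice parent_tree_node_path none (some n) ∈ granted))

-- ===== PRECONDITION & SPEC =====
def Spec_parent_tree_node_path__gt__has_perm_tree_node_paths (has_perm_tree_node_paths : List String) (parent_tree_node_path : String) (out : Bool) : Prop := out = parent_tree_node_path__gt__has_perm_tree_node_paths_alt has_perm_tree_node_paths parent_tree_node_path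
instance (has_perm_tree_node_paths : List String) (parent_tree_node_path : String) (out : Bool) : Decidable (Spec_parent_tree_node_path__gt__has_perm_tree_node_paths has_perm_tree_node_paths parent_tree_node_path out) := by unfold Spec_parent_tree_node_path__gt__has_perm_tree_node_paths; infer_instance

-- ===== CLAIM (what is proved, stated in full; the proofs are below) =====
def Claim_equal_parent_tree_node_path__gt__has_perm_tree_node_paths : Prop := ∀ (has_perm_tree_node_paths : List String) (parent_tree_node_path : String), Dom_parent_tree_node_path__gt__has_perm_tree_node_paths has_perm_tree_node_paths parent_tree_node_path → Spec_parent_tree_node_path__gt__has_perm_tree_node_paths has_perm_tree_node_paths parent_tree_node_path (parent_tree_node_path__gt__has_perm_tree_node_paths has_perm_tree_node_paths parent_tree_node_path)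

-- ===== LEMMAS AND PROOFS =====

-- a strict initial segment of a list is lexicographically smaller
theorem pv_take_lt (l : List Char) (i : Nat) (h : i < l.length) : l.take i < l := by
  induction l generalizing i with
  | nil => simp at h
  | cons a t ih =>
    cases i with
    | zero => simp
    | succ j =>
      simp only [List.take_succ_cons]
      exact List.cons_lt_cons_self.mpr (ih j (by simpa using h))

-- "p is a prefix of s and p < s" ↔ "p is s truncated to some i < |s|"
theorem pv_prefix_lt_iff (s p : String) :
    (PySem.Str.startswith s p = true ∧ p < s) ↔
      ∃ i : Nat, i < s.toList.length ∧ PySem.Str.slice s none (some (i : Int)) = p := by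
  constructor
  · rintro ⟨hsw, hlt⟩
    have hpre : p.toList <+: s.toList := by
      simpa [PySem.Chars.startswith_iff] using hsw
    have htake : p.toList = s.toList.take p.toList.length :=
      List.prefix_iff_eq_take.mp hpre
    refine ⟨p.toList.length, ?_, ?_⟩
    · by_contra hge
      push_neg at hge
      have : p.toList = s.toList := by
        rw [htake, List.take_of_length_le hge]
      exact absurd hlt (by simp [String.toList_inj.mp this])
    · apply String.toList_inj.mp
      simpa [PySem.Str.toList_slice, PySem.List.slice_to_natCast] using htake.symm
  · rintro ⟨i, hi, hsl⟩
    have htl : p.toList = s.toList.take i := by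
      rw [← hsl]; simp [PySem.Str.toList_slice, PySem.List.slice_to_natCast]
    constructor
    · simp [PySem.Chars.startswith_iff, htl, List.take_prefix]
    · rw [String.lt_iff_toList_lt, htl]
      exact pv_take_lt _ _ hi

-- A's loop returns true iff some stored path passes A's test
theorem pv_loopA_iff (parent : String) (l : List String) :
    pvLoopA parent l = true ↔
      ∃ p ∈ l, PySem.Str.startswith parent p = true ∧ p < parent := by
  induction l with
  | nil => simp [pvLoopA]
  | cons h t ih =>
    rw [pvLoopA]
    by_cases hc : (PySem.Str.startswith parent h && decide (h < parent)) = true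
    · rw [if_pos hc]
      simp only [Bool.and_eq_true, decide_eq_true_iff] at hc
      exact iff_of_true rfl ⟨h, by simp, hc⟩
    · rw [if_neg hc, ih]
      rw [Bool.and_eq_true, decide_eq_true_iff] at hc
      constructor
      · rintro ⟨p, hp, hcond⟩
        exact ⟨p, List.mem_cons_of_mem _ hp, hcond⟩
      · rintro ⟨p, hp, hcond⟩
        rcases List.mem_cons.mp hp with rfl | hp'
        · exact absurd hcond hc
        · exact ⟨p, hp', hcond⟩

-- ===== VERDICT (by name: the statement is the Claim_ definition above) =====
theorem parent_tree_node_path__gt__has_perm_tree_node_paths_spec : Claim_equal_parent_tree_node_path__gt__has_perm_tree_node_paths := by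
  intro hp parent _
  unfold Spec_parent_tree_node_path__gt__has_perm_tree_node_paths
  unfold parent_tree_node_path__gt__has_perm_tree_node_paths
    parent_tree_node_path__gt__has_perm_tree_node_paths_alt
  rw [Bool.eq_iff_iff, pv_loopA_iff, List.any_eq_true]
  constructor
  · rintro ⟨p, hp_mem, hcond⟩
    obtain ⟨i, hi, hsl⟩ := (pv_prefix_lt_iff parent p).mp hcond
    have h2 : p.toList = parent.toList.take i := by
      rw [← hsl]; simp [PySem.Str.toList_slice, PySem.List.slice_to_natCast]
    have hplen : p.length = i := by
      have h3 : p.toList.length = i := by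
        rw [String.length_toList] at hi
        rw [h2]; simp [List.length_take]; omega
      rwa [String.length_toList] at h3
    refine ⟨(i : Int), ?_, ?_⟩
    · rw [PySem.Set.mem_ofList]
      refine List.mem_map.mpr ⟨p, ?_, ?_⟩
      · exact (PySem.Set.mem_ofList hp p).mpr hp_mem
      · simp [PySem.Str.len_eq, hplen]
    · rw [Bool.and_eq_true]
      refine ⟨?_, ?_⟩
      · rw [String.length_toList] at hi
        simp only [decide_eq_true_iff, PySem.Str.len_eq]
        exact_mod_cast hi
      · simp only [decide_eq_true_iff, PySem.Set.mem_ofList, hsl]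
        exact hp_mem
  · rintro ⟨n, hmem, hdec⟩
    rw [Bool.and_eq_true] at hdec
    obtain ⟨hlt, hin⟩ := hdec
    simp only [decide_eq_true_iff] at hlt
    simp only [decide_eq_true_iff, PySem.Set.mem_ofList] at hin
    have hn0 : 0 ≤ n := by
      rw [PySem.Set.mem_ofList] at hmem
      obtain ⟨q, _, rfl⟩ := List.mem_map.mp hmem
      simp [PySem.Str.len_eq]
    refine ⟨_, hin, ?_⟩
    apply (pv_prefix_lt_iff parent _).mpr
    refine ⟨n.toNat, ?_, ?_⟩
    · rw [String.length_toList]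
      simp [PySem.Str.len_eq] at hlt
      omega
    · rw [Int.toNat_of_nonneg hn0]
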